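-- pv_equiv track=rewrite | github.com/Sangioo/Ingegneria-Infomatica | Introduzione-alla-programmazione/Dispense/LabPython06/A_Ex2.py | A_Ex2
-- ===== SOURCE A (Python) =====
-- def A_Ex2(start,n):
--     ris = []
--     while len(ris)<n:
--         if start%2 == 1:
--             ris.append(start)
--             start += 2
--         else:
--             start += 1
--
--     return ris
-- ===== SOURCE B (Python) =====
-- def A_Ex2(start, n):
--     first = start if start % 2 == 1 else start + 1
--     res = []
--     i = 0
--     while i < n:
--         res.append(first + 2 * i)
--         i += 1
--     return res
-- ===== Notes on version B (the rewrite author's own statement) =====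
-- stated objective: simpler
-- what changed: B computes the first odd value at or after start once and then generates the n odds by a fixed offset first+2*i, removing A's per-iteration parity branch and the skip-even iterations.
import Mathlib
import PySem

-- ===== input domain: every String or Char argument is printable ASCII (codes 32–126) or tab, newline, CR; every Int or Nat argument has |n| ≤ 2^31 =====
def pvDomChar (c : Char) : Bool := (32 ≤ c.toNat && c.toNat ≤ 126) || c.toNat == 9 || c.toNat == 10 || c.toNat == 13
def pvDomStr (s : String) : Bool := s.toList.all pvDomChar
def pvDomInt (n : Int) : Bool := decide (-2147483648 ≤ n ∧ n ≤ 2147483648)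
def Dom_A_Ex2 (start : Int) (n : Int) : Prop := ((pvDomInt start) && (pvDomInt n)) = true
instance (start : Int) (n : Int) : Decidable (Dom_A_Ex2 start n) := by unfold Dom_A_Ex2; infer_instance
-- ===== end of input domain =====

-- B computes the first odd value >= start once and generates the list by offsets first+2*i (simpler: no per-iteration parity branch).
-- ===== PORT A =====
-- bridge used by the port's termination proof
lemma pymod2 (a : Int) : PySem.Int.mod a 2 = a % 2 := by
  simp [PySem.Int.mod, Int.fmod_eq_emod]

def A_Ex2_loop (start : Int) (n : Int) (ris : List Int) : List Int :=
  if ris.length < n then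
    if PySem.Int.mod start 2 = 1 then
      A_Ex2_loop (start + 2) n (ris ++ [start])
    else
      A_Ex2_loop (start + 1) n ris
  else ris
termination_by ((n - ris.length).toNat, if PySem.Int.mod start 2 = 1 then 0 else 1)
decreasing_by
  · apply Prod.Lex.left; simp only [List.length_append, List.length_cons, List.length_nil]; omega
  · have h2 : PySem.Int.mod (start + 1) 2 = 1 := by
      rw [pymod2] at *; omega
    have h1 : ¬ PySem.Int.mod start 2 = 1 := by assumption
    apply Prod.Lex.right'
    · omega
    · rw [pymod2] at h1 h2
      simp [h1, h2]

def A_Ex2 (start : Int) (n : Int) : List Int := A_Ex2_loop start n []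

-- ===== PORT B =====
def A_Ex2_alt_loop (first : Int) (n : Int) (i : Int) (res : List Int) : List Int :=
  if i < n then A_Ex2_alt_loop first n (i + 1) (res ++ [first + 2 * i]) else res
termination_by (n - i).toNat
decreasing_by omega

def A_Ex2_alt (start : Int) (n : Int) : List Int :=
  let first := if PySem.Int.mod start 2 = 1 then start else start + 1
  A_Ex2_alt_loop first n 0 []

-- ===== PRECONDITION & SPEC =====
def Spec_A_Ex2 (start : Int) (n : Int) (out : List Int) : Prop := out = A_Ex2_alt start n
instance (start : Int) (n : Int) (out : List Int) : Decidable (Spec_A_Ex2 start n out) := by unfold Spec_A_Ex2; infer_instance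

-- ===== CLAIM (what is proved, stated in full; the proofs are below) =====
def Claim_equal_A_Ex2 : Prop := ∀ (start : Int) (n : Int), Dom_A_Ex2 start n → Spec_A_Ex2 start n (A_Ex2 start n)

-- ===== LEMMAS AND PROOFS =====

-- ===== VERDICT (by name: the statement is the Claim_ definition above) =====
lemma loop_agree (fuel : Nat) : ∀ (first n : Int) (res : List Int),
    (n - res.length).toNat ≤ fuel → PySem.Int.mod first 2 = 1 →
    A_Ex2_loop (first + 2 * res.length) n res = A_Ex2_alt_loop first n res.length res := by
  induction fuel with
  | zero =>
    intro first n res hf hodd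
    have hn : ¬ ((res.length : Int) < n) := by omega
    rw [A_Ex2_loop, A_Ex2_alt_loop]
    simp [hn]
  | succ k ih =>
    intro first n res hf hodd
    rw [A_Ex2_loop, A_Ex2_alt_loop]
    by_cases hn : (res.length : Int) < n
    · have hodd' : PySem.Int.mod (first + 2 * res.length) 2 = 1 := by
        rw [pymod2] at *; omega
      simp only [hn, if_pos, hodd']
      have := ih first n (res ++ [first + 2 * (res.length : Int)])
        (by simp; omega) hodd
      simpa [List.length_append, add_mul, mul_add, add_assoc, add_comm, add_left_comm] using this
    · simp [hn]

theorem A_Ex2_spec : Claim_equal_A_Ex2 := by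
  intro start n _
  unfold Spec_A_Ex2 A_Ex2 A_Ex2_alt
  by_cases hodd : PySem.Int.mod start 2 = 1
  · simp only [hodd, if_true]
    have := loop_agree (n - 0).toNat start n [] (by simp) hodd
    simpa using this
  · simp only [hodd, if_false]
    rw [A_Ex2_loop]
    by_cases hn : ((0:Int) < n)
    · have hodd' : PySem.Int.mod (start + 1) 2 = 1 := by
        rw [pymod2] at *; omega
      simp only [List.length_nil, Nat.cast_zero, hn, if_pos, hodd, if_false]
      have := loop_agree (n - 0).toNat (start + 1) n [] (by simp) hodd'
      simpa using this
    · rw [A_Ex2_alt_loop]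
      simp [hn]
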